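-- pv_equiv track=rewrite | github.com/RecoRecoNi/Algorithm-Study | Programmers/스킬트리/jisu.py | solution
-- ===== SOURCE A (Python) =====
-- from typing import List
--
-- def solution(skill: str, skill_trees: List[str]) -> int:
--     before = {}  # 어떤 스킬의 직전 선행 스킬을 담을 dict
--     answer = 0
--
--     for idx in range(len(skill) - 1):
--         before[skill[idx + 1]] = skill[idx]  # 선행 스킬이 필요한 경우 직전 선행 스킬 담기
--
--     for skill_tree in skill_trees:
--         learned = {s: False for s in skill}  # 선행 스킬을 배웠는지의 여부
--         is_failed = False  # 정답 여부를 판단하기 위한 flag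
--         for sk in skill_tree:
--             if sk in before and not learned[before[sk]]:  # 선행 스킬이 필요한데 안 배운 경우
--                 is_failed = True  # Fail
--                 break
--             learned[sk] = True
--
--         if not is_failed:  # 모두 제대로 배웠으면
--             answer += 1  # 정답
--
--     return answer
-- ===== SOURCE B (Python) =====
-- from typing import List
--
--
-- def solution(skill: str, skill_trees: List[str]) -> int:
--     # progress-counter approach: learnable skills are always a prefix of `skill`
--     order = {ch: i for i, ch in enumerate(skill)}
--     answer = 0
--     for tree in skill_trees:
--         pos = 0  # number of prefix skills learned so far
--         ok = True
--         for c in tree: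
--             i = order.get(c)
--             if i is None:
--                 continue  # not a required skill
--             if i > pos:
--                 ok = False
--                 break
--             if i == pos:
--                 pos += 1  # next prefix skill learned (i < pos: a repeat, ignore)
--         if ok:
--             answer += 1
--     return answer
-- ===== Notes on version B (the rewrite author's own statement) =====
-- stated objective: faster
-- what changed: Replaces the predecessor-dict plus a fresh per-tree boolean 'learned' dictionary with one char->index map built once and a single integer progress counter per tree (learnable skills are always a prefix of skill), so no per-tree dictionary is built or mutated.
import Mathlib
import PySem

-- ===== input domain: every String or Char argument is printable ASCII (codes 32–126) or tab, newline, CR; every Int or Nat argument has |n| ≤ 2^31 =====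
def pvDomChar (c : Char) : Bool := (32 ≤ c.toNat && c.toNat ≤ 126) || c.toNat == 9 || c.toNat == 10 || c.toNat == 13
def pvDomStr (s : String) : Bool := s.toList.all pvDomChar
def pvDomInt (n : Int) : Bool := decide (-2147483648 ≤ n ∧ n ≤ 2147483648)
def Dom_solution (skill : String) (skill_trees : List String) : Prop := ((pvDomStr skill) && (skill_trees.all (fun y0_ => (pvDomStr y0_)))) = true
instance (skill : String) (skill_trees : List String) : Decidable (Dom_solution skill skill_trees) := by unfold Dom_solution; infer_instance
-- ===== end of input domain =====

-- B replaces A's predecessor-dict + fresh per-tree 'learned' dict with one char->index map and an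
-- integer progress counter per tree (no per-tree dict; measured faster); return values proved equal.

-- ===== PORT A =====
-- before = {}; for idx in range(len(skill)-1): before[skill[idx+1]] = skill[idx]
-- (pyGetD is exact here: idx and idx+1 are always in range for idx in range(len(skill)-1))
def buildBefore (s : List Char) : PySem.Dict Char Char :=
  (PySem.List.pyRange 0 ((s.length : Int) - 1) 1).foldl
    (fun d idx => d.insert (PySem.List.pyGetD s (idx + 1) ' ') (PySem.List.pyGetD s idx ' '))
    PySem.Dict.empty

-- learned = {s: False for s in skill}
def initLearned (s : List Char) : PySem.Dict Char Bool :=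
  s.foldl (fun d c => d.insert c false) PySem.Dict.empty

-- the inner 'for sk in skill_tree' loop with its break; returns is_failed
-- (learned[before[sk]] is exact as getD: before's values are skill chars, all keys of learned)
def goA (before : PySem.Dict Char Char) (learned : PySem.Dict Char Bool) :
    List Char → Bool
  | [] => false
  | c :: rest =>
    match before.get? c with
    | some p =>
      if learned.getD p false then goA before (learned.insert c true) rest
      else true
    | none => goA before (learned.insert c true) rest

def solution (skill : String) (skill_trees : List String) : Int :=
  let before := buildBefore skill.toList
  skill_trees.foldl
    (fun answer t =>
      if goA before (initLearned skill.toList) t.toList then answer else answer + 1)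
    0

-- ===== PORT B =====
-- order = {ch: i for i, ch in enumerate(skill)}
def buildOrder (s : List Char) : PySem.Dict Char Int :=
  (PySem.List.enumerate s 0).foldl (fun d p => d.insert p.2 p.1) PySem.Dict.empty

-- the inner loop of B: progress counter pos, returns ok
def goB (order : PySem.Dict Char Int) (pos : Int) : List Char → Bool
  | [] => true
  | c :: rest =>
    match order.get? c with
    | none => goB order pos rest
    | some i =>
      if i > pos then false
      else if i = pos then goB order (pos + 1) rest
      else goB order pos rest

def solution_alt (skill : String) (skill_trees : List String) : Int :=
  let order := buildOrder skill.toList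
  skill_trees.foldl
    (fun answer t => if goB order 0 t.toList then answer + 1 else answer)
    0

-- ===== PRECONDITION & SPEC =====
def Spec_solution (skill : String) (skill_trees : List String) (out : Int) : Prop := out = solution_alt skill skill_trees
instance (skill : String) (skill_trees : List String) (out : Int) : Decidable (Spec_solution skill skill_trees out) := by unfold Spec_solution; infer_instance

-- ===== CLAIM (what is proved, stated in full; the proofs are below) =====
def Claim_equal_solution : Prop := ∀ (skill : String) (skill_trees : List String), Dom_solution skill skill_trees → Spec_solution skill skill_trees (solution skill skill_trees)

-- ===== LEMMAS AND PROOFS =====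

lemma buildOrder_append (t : List Char) (a : Char) :
    buildOrder (t ++ [a]) = (buildOrder t).insert a (t.length : Int) := by
  simp [buildOrder, PySem.List.enumerate_append, List.foldl_append, PySem.List.enumerate_cons,
    PySem.List.enumerate_nil]

lemma buildBefore_append (t : List Char) (a : Char) (ht : t ≠ []) :
    buildBefore (t ++ [a]) = (buildBefore t).insert a (t.getD (t.length - 1) ' ') := by
  have hlen : 0 < t.length := List.length_pos_iff.mpr ht
  unfold buildBefore
  have h1 : ((t ++ [a]).length : Int) - 1 = ((t.length - 1 : Nat) : Int) + 1 := by
    simp; omega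
  rw [h1, PySem.List.pyRange_one_succ_right (by positivity), List.foldl_append]
  have h2 : ((t.length : Int) - 1) = ((t.length - 1 : Nat) : Int) := by omega
  rw [h2]
  have hcong : (PySem.List.pyRange 0 ((t.length - 1 : Nat) : Int) 1).foldl
      (fun d idx => d.insert (PySem.List.pyGetD (t ++ [a]) (idx + 1) ' ') (PySem.List.pyGetD (t ++ [a]) idx ' '))
      PySem.Dict.empty
      = (PySem.List.pyRange 0 ((t.length - 1 : Nat) : Int) 1).foldl
      (fun d idx => d.insert (PySem.List.pyGetD t (idx + 1) ' ') (PySem.List.pyGetD t idx ' '))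
      PySem.Dict.empty := by
    apply PySem.List.foldl_congr_mem
    intro acc x hx
    rw [PySem.List.mem_pyRange_one] at hx
    obtain ⟨hx0, hx1⟩ := hx
    rw [PySem.List.pyGetD_eq_getElem _ ' ' (by omega) (by first | (simp only [List.length_append, List.length_cons, List.length_nil]; omega) | omega),
        PySem.List.pyGetD_eq_getElem _ ' ' (by omega) (by first | (simp only [List.length_append, List.length_cons, List.length_nil]; omega) | omega),
        PySem.List.pyGetD_eq_getElem _ ' ' (by omega) (by first | (simp only [List.length_append, List.length_cons, List.length_nil]; omega) | omega),
        PySem.List.pyGetD_eq_getElem _ ' ' (by omega) (by first | (simp only [List.length_append, List.length_cons, List.length_nil]; omega) | omega)]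
    rw [List.getElem_append_left (by omega), List.getElem_append_left (by omega)]
  rw [hcong]
  simp only [List.foldl_cons, List.foldl_nil]
  congr 1
  · rw [PySem.List.pyGetD_eq_getElem _ ' ' (by omega) (by first | (simp only [List.length_append, List.length_cons, List.length_nil]; omega) | omega)]
    rw [List.getElem_append_right (by omega)]
    simp
  · rw [PySem.List.pyGetD_eq_getElem _ ' ' (by omega) (by first | (simp only [List.length_append, List.length_cons, List.length_nil]; omega) | omega)]
    rw [List.getElem_append_left (by omega)]
    rw [List.getD_eq_getElem _ _ (by omega)]
    simp only [Int.toNat_natCast]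

lemma order_get_none_iff (s : List Char) (c : Char) :
    (buildOrder s).get? c = none ↔ c ∉ s := by
  induction s using List.reverseRecOn with
  | nil => simp [buildOrder, PySem.List.enumerate_nil, PySem.Dict.get?_empty]
  | append_singleton t a ih =>
    rw [buildOrder_append, PySem.Dict.get?_insert]
    by_cases hca : c = a
    · simp [hca]
    · simp [hca, ih]

lemma order_get_spec (s : List Char) (c : Char) (i : Int)
    (h : (buildOrder s).get? c = some i) :
    0 ≤ i ∧ i < s.length ∧ s.getD i.toNat ' ' = c ∧
      ∀ j : Nat, j < s.length → i < (j : Int) → s.getD j ' ' ≠ c := by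
  induction s using List.reverseRecOn generalizing i with
  | nil => simp [buildOrder, PySem.List.enumerate_nil, PySem.Dict.get?_empty] at h
  | append_singleton t a ih =>
    rw [buildOrder_append, PySem.Dict.get?_insert] at h
    by_cases hca : c = a
    · subst hca
      rw [if_pos rfl] at h
      injection h with h
      subst h
      refine ⟨by positivity, by simp only [List.length_append, List.length_cons, List.length_nil]; push_cast; omega, ?_, ?_⟩
      · simp only [Int.toNat_natCast]
        rw [List.getD_eq_getElem _ _ (by simp)]
        rw [List.getElem_append_right (by omega)]
        simp
      · intro j hj hij
        simp only [List.length_append, List.length_cons, List.length_nil] at hj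
        omega
    · rw [if_neg hca] at h
      obtain ⟨h0, h1, h2, h3⟩ := ih _ h
      refine ⟨h0, by simp only [List.length_append, List.length_cons, List.length_nil]; push_cast; omega, ?_, ?_⟩
      · rw [List.getD_eq_getElem _ _ (by simp only [List.length_append, List.length_cons, List.length_nil]; omega), List.getElem_append_left (by omega)]
        rw [List.getD_eq_getElem _ _ (by omega)] at h2
        exact h2
      · intro j hj hij
        simp only [List.length_append, List.length_cons, List.length_nil] at hj
        by_cases hjt : j < t.length
        · rw [List.getD_eq_getElem _ _ (by simp only [List.length_append, List.length_cons, List.length_nil]; omega), List.getElem_append_left hjt]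
          have h4 := h3 j hjt hij
          rw [List.getD_eq_getElem _ _ hjt] at h4
          exact h4
        · have hjl : j = t.length := by omega
          rw [hjl, List.getD_eq_getElem _ _ (by simp), List.getElem_append_right (by omega)]
          simpa using fun hc => hca hc.symm

lemma before_get_eq (s : List Char) (c : Char) :
    (buildBefore s).get? c =
      match (buildOrder s).get? c with
      | some i => if i = 0 then none else some (s.getD (i.toNat - 1) ' ')
      | none => none := by
  induction s using List.reverseRecOn with
  | nil => simp [buildBefore, buildOrder, PySem.List.enumerate_nil, PySem.Dict.get?_empty]
  | append_singleton t a ih =>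
    rw [buildOrder_append, PySem.Dict.get?_insert]
    rcases List.eq_nil_or_concat' t with ht | ⟨t', a', ht⟩
    · subst ht
      have hb : buildBefore ([] ++ [a]) = PySem.Dict.empty := by
        rfl
      rw [hb]
      by_cases hca : c = a <;> simp [hca, PySem.Dict.get?_empty, buildOrder,
        PySem.List.enumerate_nil, List.foldl_nil]
    · have htne : t ≠ [] := by subst ht; simp
      rw [buildBefore_append t a htne, PySem.Dict.get?_insert]
      by_cases hca : c = a
      · rw [if_pos hca, if_pos hca]
        have hlen : 0 < t.length := List.length_pos_iff.mpr htne
        have hred : (match some (t.length : Int) with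
            | some i => if i = 0 then none else some ((t ++ [a]).getD (i.toNat - 1) ' ')
            | none => none)
            = if (t.length : Int) = 0 then none
              else some ((t ++ [a]).getD ((t.length : Int).toNat - 1) ' ') := rfl
        rw [hred, if_neg (by omega : ¬ ((t.length : Int) = 0))]
        congr 1
        have hidx : ((t.length : Int)).toNat - 1 = t.length - 1 := by omega
        rw [hidx]
        rw [List.getD_eq_getElem t _ (by omega),
            List.getD_eq_getElem (t ++ [a]) _ (by simp only [List.length_append, List.length_cons, List.length_nil]; omega)]
        rw [List.getElem_append_left (by omega)]
      · rw [if_neg hca, if_neg hca, ih]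
        cases ho : (buildOrder t).get? c with
        | none => rfl
        | some i =>
          obtain ⟨h0, h1, _, _⟩ := order_get_spec t c i ho
          simp only
          by_cases hi0 : i = 0
          · rw [if_pos hi0, if_pos hi0]
          · rw [if_neg hi0, if_neg hi0]
            congr 1
            rw [List.getD_eq_getElem _ _ (by omega),
                List.getD_eq_getElem _ _ (by simp [List.length_append]; omega)]
            rw [List.getElem_append_left (by omega)]


lemma initLearned_getD (s : List Char) (c : Char) :
    (initLearned s).getD c false = false := by
  suffices h : ∀ (l : List Char) (d : PySem.Dict Char Bool),
      (∀ c', d.getD c' false = false) →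
      ∀ c', (l.foldl (fun d c => d.insert c false) d).getD c' false = false by
    exact h s PySem.Dict.empty (fun c' => PySem.Dict.getD_empty _ _) c
  intro l
  induction l with
  | nil => intro d hd c'; simpa using hd c'
  | cons x xs ih =>
    intro d hd c'
    simp only [List.foldl_cons]
    apply ih
    intro c''
    rw [PySem.Dict.getD_insert]
    split <;> [rfl; exact hd c'']


def LoopInv (s : List Char) (learned : PySem.Dict Char Bool) (pos : Int) : Prop :=
  0 ≤ pos ∧
  (∀ k : Nat, k < s.length → (k : Int) < pos →
    (buildOrder s).get? (s.getD k ' ') = some (k : Int)) ∧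
  (∀ c ∈ s, ∀ i : Int, (buildOrder s).get? c = some i →
    learned.getD c false = decide (i < pos))

lemma order_inj (s : List Char) (c c' : Char) (i : Int)
    (h : (buildOrder s).get? c = some i) (h' : (buildOrder s).get? c' = some i) :
    c = c' := by
  obtain ⟨_, _, h2, _⟩ := order_get_spec s c i h
  obtain ⟨_, _, h2', _⟩ := order_get_spec s c' i h'
  rw [← h2, ← h2']

lemma inv3_insert (s : List Char) (learned : PySem.Dict Char Bool) (pos pos' : Int)
    (c : Char) (i : Int) (ho : (buildOrder s).get? c = some i)
    (h3old : ∀ c' ∈ s, ∀ i' : Int, (buildOrder s).get? c' = some i' →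
      learned.getD c' false = decide (i' < pos))
    (hc : i < pos')
    (hmono : ∀ i' : Int, i' ≠ i → (i' < pos ↔ i' < pos')) :
    ∀ c' ∈ s, ∀ i' : Int, (buildOrder s).get? c' = some i' →
      (learned.insert c true).getD c' false = decide (i' < pos') := by
  intro c' hc' i' hi'
  rw [PySem.Dict.getD_insert]
  by_cases hcc : c' = c
  · subst hcc
    rw [hi'] at ho
    injection ho with ho
    rw [if_pos rfl]
    simp [ho, hc]
  · rw [if_neg hcc]
    rw [h3old c' hc' i' hi']
    have hii : i' ≠ i := by
      intro he
      subst he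
      exact hcc (order_inj s c' c i' hi' ho)
    exact decide_eq_decide.mpr (hmono i' hii)

lemma inv3_insert_notin (s : List Char) (learned : PySem.Dict Char Bool) (pos : Int)
    (c : Char) (hc : c ∉ s)
    (h3old : ∀ c' ∈ s, ∀ i' : Int, (buildOrder s).get? c' = some i' →
      learned.getD c' false = decide (i' < pos)) :
    ∀ c' ∈ s, ∀ i' : Int, (buildOrder s).get? c' = some i' →
      (learned.insert c true).getD c' false = decide (i' < pos) := by
  intro c' hc' i' hi'
  have hne : ¬ c' = c := by
    intro he
    subst he
    exact hc hc'
  rw [PySem.Dict.getD_insert, if_neg hne]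
  exact h3old c' hc' i' hi'

lemma inv2_succ (s : List Char) (pos i : Int) (c : Char)
    (h0 : 0 ≤ i) (h1 : i < s.length) (h2 : s.getD i.toNat ' ' = c)
    (ho : (buildOrder s).get? c = some i) (hip : i = pos)
    (hH2 : ∀ k : Nat, k < s.length → (k : Int) < pos →
      (buildOrder s).get? (s.getD k ' ') = some (k : Int)) :
    ∀ k : Nat, k < s.length → (k : Int) < pos + 1 →
      (buildOrder s).get? (s.getD k ' ') = some (k : Int) := by
  intro k hk hkp
  by_cases hkpos : (k : Int) < pos
  · exact hH2 k hk hkpos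
  · have hki : k = i.toNat := by omega
    subst hki
    rw [h2, ho]
    congr 1
    omega

lemma goA_eq_not_goB (s : List Char) (cs : List Char) :
    ∀ (learned : PySem.Dict Char Bool) (pos : Int), LoopInv s learned pos →
      goA (buildBefore s) learned cs = !goB (buildOrder s) pos cs := by
  induction cs with
  | nil => intro learned pos _; simp [goA, goB]
  | cons c rest ih =>
    intro learned pos hInv
    obtain ⟨hpos, hH2, hH3⟩ := hInv
    simp only [goA, goB, before_get_eq s c]
    cases ho : (buildOrder s).get? c with
    | none =>
      have hcs : c ∉ s := (order_get_none_iff s c).mp ho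
      simp only
      exact ih _ pos ⟨hpos, hH2, inv3_insert_notin s learned pos c hcs hH3⟩
    | some i =>
      obtain ⟨h0, h1, h2, h3⟩ := order_get_spec s c i ho
      have hmem : c ∈ s := by
        rw [← h2]
        rw [List.getD_eq_getElem _ _ (by omega)]
        exact List.getElem_mem _
      simp only
      by_cases hi0 : i = 0
      · subst hi0
        rw [if_pos rfl, if_neg (by omega : ¬ (0 : Int) > pos)]
        by_cases hp0 : (0 : Int) = pos
        · rw [if_pos hp0]
          apply ih _ (pos + 1)
          refine ⟨by omega, inv2_succ s pos 0 c h0 h1 h2 ho hp0 hH2, ?_⟩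
          exact inv3_insert s learned pos (pos + 1) c 0 ho hH3 (by omega)
            (fun i' hii => by constructor <;> intro h <;> omega)
        · rw [if_neg hp0]
          apply ih _ pos
          refine ⟨hpos, hH2, ?_⟩
          exact inv3_insert s learned pos pos c 0 ho hH3 (by omega)
            (fun i' hii => Iff.rfl)
      · rw [if_neg hi0]
        set p := s.getD (i.toNat - 1) ' ' with hp
        have hred : (match some p with
            | some q => if learned.getD q false = true then goA (buildBefore s) (learned.insert c true) rest else true
            | none => goA (buildBefore s) (learned.insert c true) rest)
            = if learned.getD p false = true then goA (buildBefore s) (learned.insert c true) rest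
              else true := rfl
        rw [hred]
        have hpmem : p ∈ s := by
          rw [hp, List.getD_eq_getElem _ _ (by omega)]
          exact List.getElem_mem _
        cases hop : (buildOrder s).get? p with
        | none => exact absurd ((order_get_none_iff s p).mp hop) (by simp [hpmem])
        | some ip =>
          obtain ⟨hp0', hp1', hp2', hp3'⟩ := order_get_spec s p ip hop
          have hK1 : i - 1 ≤ ip := by
            by_contra hcon
            rw [not_le] at hcon
            exact hp3' (i.toNat - 1) (by omega) (by omega) hp
          have hlp := hH3 p hpmem ip hop
          by_cases hle : i ≤ pos
          · have hK2 : ip = i - 1 := by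
              have := hH2 (i.toNat - 1) (by omega) (by omega)
              rw [← hp] at this
              rw [this] at hop
              injection hop with hop
              omega
            have hlearned : learned.getD p false = true := by
              rw [hlp]
              simp
              omega
            rw [hlearned, if_pos rfl, if_neg (by omega : ¬ i > pos)]
            by_cases hip : i = pos
            · rw [if_pos hip]
              apply ih _ (pos + 1)
              refine ⟨by omega, inv2_succ s pos i c h0 h1 h2 ho hip hH2, ?_⟩
              exact inv3_insert s learned pos (pos + 1) c i ho hH3 (by omega)
                (fun i' hii => by constructor <;> intro h <;> omega)
            · rw [if_neg hip]
              apply ih _ pos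
              refine ⟨hpos, hH2, ?_⟩
              exact inv3_insert s learned pos pos c i ho hH3 (by omega)
                (fun i' hii => Iff.rfl)
          · have hgt : i > pos := by omega
            have hlearned : learned.getD p false = false := by
              rw [hlp]
              simp
              omega
            rw [hlearned, if_pos hgt]
            simp

-- ===== VERDICT (by name: the statement is the Claim_ definition above) =====
theorem solution_spec : Claim_equal_solution := by
  intro skill skill_trees _
  unfold Spec_solution solution solution_alt
  have htree : ∀ t : String,
      goA (buildBefore skill.toList) (initLearned skill.toList) t.toList
        = !goB (buildOrder skill.toList) 0 t.toList := by
    intro t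
    apply goA_eq_not_goB
    refine ⟨le_refl 0, ?_, ?_⟩
    · intro k _ hk; omega
    · intro c _ i hi
      have h0 := (order_get_spec skill.toList c i hi).1
      simp [initLearned_getD]
      omega
  have : ∀ (ans : Int) (t : String),
      (if goA (buildBefore skill.toList) (initLearned skill.toList) t.toList then ans else ans + 1)
        = (if goB (buildOrder skill.toList) 0 t.toList then ans + 1 else ans) := by
    intro ans t
    rw [htree t]
    cases goB (buildOrder skill.toList) 0 t.toList <;> simp
  simp only [this]
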